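-- pv_equiv track=rewrite | github.com/0101mirabror/Hackerrank | codewars/flick_switch.py | flick_switch
-- ===== SOURCE A (Python) =====
-- def flick_switch(lst):
--     k = []
--     t = True
--     for i in lst:
--         if i == 'flick':
--             t = False
--             k.append(t)
--         else:
--             k.append(t)
--     return k
-- ===== SOURCE B (Python) =====
-- def flick_switch(lst):
--     try:
--         idx = lst.index('flick')
--     except ValueError:
--         idx = len(lst)
--     return [True] * idx + [False] * (len(lst) - idx)
-- ===== Notes on version B (the rewrite author's own statement) =====
-- stated objective: simpler
-- what changed: Replaces the state-carrying loop by computing the index of the first 'flick' once and building the answer as [True]*idx + [False]*(len-idx).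
import Mathlib
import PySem

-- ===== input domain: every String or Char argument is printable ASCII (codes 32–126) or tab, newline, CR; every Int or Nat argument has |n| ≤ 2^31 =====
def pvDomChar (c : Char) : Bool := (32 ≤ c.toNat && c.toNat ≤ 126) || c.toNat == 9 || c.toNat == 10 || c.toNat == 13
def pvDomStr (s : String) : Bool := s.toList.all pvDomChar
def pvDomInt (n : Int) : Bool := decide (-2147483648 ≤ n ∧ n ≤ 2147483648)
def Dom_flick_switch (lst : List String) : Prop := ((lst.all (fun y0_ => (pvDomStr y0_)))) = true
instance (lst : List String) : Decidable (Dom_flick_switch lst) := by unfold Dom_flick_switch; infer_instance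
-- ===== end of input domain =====

-- B computes the cutoff index of the first 'flick' once and builds the list directly (simpler, no running state).

-- ===== PORT A =====
-- the loop body: state is (k, t); on 'flick' set t to False then append, else append t
def flick_switch_step (s : List Bool × Bool) (i : String) : List Bool × Bool :=
  if i == "flick" then (s.1 ++ [false], false) else (s.1 ++ [s.2], s.2)

def flick_switch (lst : List String) : List Bool :=
  (lst.foldl flick_switch_step ([], true)).1

-- ===== PORT B =====
def flick_switch_alt (lst : List String) : List Bool :=
  let idx := (PySem.List.index? lst "flick").getD lst.length
  List.replicate idx true ++ List.replicate (lst.length - idx) false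

-- ===== PRECONDITION & SPEC =====
def Spec_flick_switch (lst : List String) (out : List Bool) : Prop := out = flick_switch_alt lst
instance (lst : List String) (out : List Bool) : Decidable (Spec_flick_switch lst out) := by unfold Spec_flick_switch; infer_instance

-- ===== CLAIM (what is proved, stated in full; the proofs are below) =====
def Claim_equal_flick_switch : Prop := ∀ (lst : List String), Dom_flick_switch lst → Spec_flick_switch lst (flick_switch lst)

-- ===== LEMMAS AND PROOFS =====

-- the accumulator only collects output: it can be pulled out front
theorem flick_switch_foldl_acc (lst : List String) (acc : List Bool) (t : Bool) :
    (lst.foldl flick_switch_step (acc, t)).1 = acc ++ (lst.foldl flick_switch_step ([], t)).1 := by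
  induction lst generalizing acc t with
  | nil => simp
  | cons x xs ih =>
    simp only [List.foldl_cons, flick_switch_step]
    by_cases hx : x == "flick"
    · rw [if_pos hx, if_pos hx]
      rw [ih (acc ++ [false]) false, ih ([] ++ [false]) false]
      simp
    · rw [if_neg hx, if_neg hx]
      rw [ih (acc ++ [t]) t, ih ([] ++ [t]) t]
      simp

-- once t is False it stays False and every step appends False
theorem flick_switch_foldl_false (lst : List String) :
    (lst.foldl flick_switch_step ([], false)).1 = List.replicate lst.length false := by
  induction lst with
  | nil => simp
  | cons x xs ih =>
    simp only [List.foldl_cons, flick_switch_step]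
    by_cases hx : (x == "flick") = true
    · rw [if_pos hx, flick_switch_foldl_acc, ih]
      simp [List.replicate_succ]
    · rw [if_neg hx, flick_switch_foldl_acc, ih]
      simp [List.replicate_succ]

theorem flick_switch_eq_alt (lst : List String) : flick_switch lst = flick_switch_alt lst := by
  induction lst with
  | nil => rfl
  | cons x xs ih =>
    unfold flick_switch flick_switch_alt
    simp only [List.foldl_cons, flick_switch_step]
    by_cases hx : x = "flick"
    · subst hx
      rw [PySem.List.index?_cons_self, if_pos (beq_self_eq_true "flick")]
      simp only [List.nil_append]
      rw [flick_switch_foldl_acc, flick_switch_foldl_false]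
      simp [List.replicate_succ]
    · rw [PySem.List.index?_cons_of_ne xs hx]
      have hbx : ¬ ((x == "flick") = true) := by simp [hx]
      rw [if_neg hbx]
      simp only [List.nil_append]
      rw [flick_switch_foldl_acc]
      have : (xs.foldl flick_switch_step ([], true)).1 = flick_switch_alt xs := ih
      rw [this]
      unfold flick_switch_alt
      cases h : PySem.List.index? xs "flick" with
      | none => simp [List.replicate_succ]
      | some k =>
        simp [List.replicate_succ]

-- ===== VERDICT (by name: the statement is the Claim_ definition above) =====
theorem flick_switch_spec : Claim_equal_flick_switch := by
  intro lst _
  unfold Spec_flick_switch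
  exact flick_switch_eq_alt lst
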